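-- pv_equiv track=rewrite | github.com/bozi6/hello-world | 08robot/08_robot1.py | energia_szamitas
-- ===== SOURCE A (Python) =====
-- MOZGAS_ENERGIA = 1
--
-- IRANYVALTAS_ENERGIA = 2
--
-- def energia_szamitas(utasitas_sor):
--     """Kiszámítja a szükséges energiát az utasítássor végrehajtásához"""
--     if not utasitas_sor:
--         return 0
--
--     # Indulási energia
--     energia = IRANYVALTAS_ENERGIA
--
--     # Mozgási energia (minden utasítás 1 egység)
--     energia += len(utasitas_sor) * MOZGAS_ENERGIA
--
--     # Irányváltási energia számítása
--     for i in range(1, len(utasitas_sor)):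
--         if utasitas_sor[i] != utasitas_sor[i - 1]:
--             energia += IRANYVALTAS_ENERGIA
--
--     return energia
-- ===== SOURCE B (Python) =====
-- MOZGAS_ENERGIA = 1
--
-- IRANYVALTAS_ENERGIA = 2
--
-- def energia_szamitas(utasitas_sor):
--     """Kiszamitja a szukseges energiat az utasitassor vegrehajtasahoz"""
--     if not utasitas_sor:
--         return 0
--
--     def valtasok(lo, hi):
--         # direction changes inside utasitas_sor[lo:hi], by divide and conquer
--         if hi - lo <= 1:
--             return 0
--         mid = (lo + hi) // 2
--         return (valtasok(lo, mid) + valtasok(mid, hi)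
--                 + (1 if utasitas_sor[mid] != utasitas_sor[mid - 1] else 0))
--
--     return (IRANYVALTAS_ENERGIA * (1 + valtasok(0, len(utasitas_sor)))
--             + MOZGAS_ENERGIA * len(utasitas_sor))
-- ===== Notes on version B (the rewrite author's own statement) =====
-- stated objective: alternative
-- what changed: A's linear index loop over range(1, len) is replaced by a divide-and-conquer recursion that splits the index range in half, counts direction changes in each half and adds the single boundary comparison, combining the counts bottom-up.
import Mathlib
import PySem

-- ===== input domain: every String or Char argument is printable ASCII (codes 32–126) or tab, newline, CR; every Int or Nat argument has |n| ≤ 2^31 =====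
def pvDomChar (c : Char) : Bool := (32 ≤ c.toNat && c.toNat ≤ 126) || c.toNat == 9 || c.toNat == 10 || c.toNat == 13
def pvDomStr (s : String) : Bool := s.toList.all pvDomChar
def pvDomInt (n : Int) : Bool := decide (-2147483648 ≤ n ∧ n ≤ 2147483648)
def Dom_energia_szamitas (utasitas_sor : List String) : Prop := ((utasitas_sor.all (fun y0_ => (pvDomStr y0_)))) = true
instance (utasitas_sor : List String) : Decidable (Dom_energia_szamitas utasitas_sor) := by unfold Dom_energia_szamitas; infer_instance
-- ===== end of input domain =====

-- B replaces A's linear index loop by a divide-and-conquer count of direction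
-- changes (split the index range in half, add the boundary comparison); objective: alternative.

-- ===== PORT A =====
-- for i in range(1, len(l)): if l[i] != l[i-1]: energia += 2
def energia_szamitas (utasitas_sor : List String) : Int :=
  if utasitas_sor = [] then 0
  else
    let energia : Int := 2
    let energia := energia + (utasitas_sor.length : Int) * 1
    (PySem.List.pyRange 1 (utasitas_sor.length : Int) 1).foldl
      (fun e i =>
        if PySem.List.pyGetD utasitas_sor i "" ≠ PySem.List.pyGetD utasitas_sor (i - 1) "" then
          e + 2
        else e) energia

-- ===== PORT B =====
-- divide-and-conquer change count on index range [lo, hi); called with lo < hi.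
-- Python's (lo + hi) // 2 equals Nat division here since lo, hi are nonnegative;
-- all indices accessed are in range, so List.getD is exact for Python's l[mid], l[mid-1]
def valtasok (l : List String) (lo hi : Nat) : Int :=
  if hi - lo ≤ 1 then 0
  else
    valtasok l lo ((lo + hi) / 2) + valtasok l ((lo + hi) / 2) hi +
      (if l.getD ((lo + hi) / 2) "" ≠ l.getD ((lo + hi) / 2 - 1) "" then 1 else 0)
termination_by hi - lo
decreasing_by all_goals omega

def energia_szamitas_alt (utasitas_sor : List String) : Int :=
  if utasitas_sor = [] then 0
  else
    2 * (1 + valtasok utasitas_sor 0 utasitas_sor.length) + (utasitas_sor.length : Int) * 1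

-- ===== PRECONDITION & SPEC =====
def Spec_energia_szamitas (utasitas_sor : List String) (out : Int) : Prop := out = energia_szamitas_alt utasitas_sor
instance (utasitas_sor : List String) (out : Int) : Decidable (Spec_energia_szamitas utasitas_sor out) := by unfold Spec_energia_szamitas; infer_instance

-- ===== CLAIM (what is proved, stated in full; the proofs are below) =====
def Claim_equal_energia_szamitas : Prop := ∀ (utasitas_sor : List String), Dom_energia_szamitas utasitas_sor → Spec_energia_szamitas utasitas_sor (energia_szamitas utasitas_sor)

-- ===== LEMMAS AND PROOFS =====

-- number of adjacent unequal pairs in x :: xs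
def chg : String → List String → Int
  | _, [] => 0
  | x, y :: t => (if x ≠ y then (1 : Int) else 0) + chg y t

-- linear left-to-right change count on [lo, hi): reference for valtasok
def cnt (l : List String) (lo hi : Nat) : Int :=
  if hi ≤ lo + 1 then 0
  else (if l.getD (lo + 1) "" ≠ l.getD lo "" then (1 : Int) else 0) + cnt l (lo + 1) hi
termination_by hi - lo
decreasing_by omega

-- A's loop, on the list x :: xs, adds 2 per adjacent unequal pair
theorem loopA_eq (x : String) (xs : List String) (e : Int) :
    (PySem.List.pyRange 1 ((x :: xs).length : Int) 1).foldl
      (fun e i =>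
        if PySem.List.pyGetD (x :: xs) i "" ≠ PySem.List.pyGetD (x :: xs) (i - 1) "" then
          e + 2
        else e) e = e + 2 * chg x xs := by
  induction xs generalizing x e with
  | nil =>
      simp [chg, PySem.List.pyRange_one_eq_nil]
  | cons y t ih =>
      have hlt : (1 : Int) < ((x :: y :: t).length : Int) := by
        simp
      rw [PySem.List.pyRange_one_cons hlt]
      simp only [List.foldl_cons]
      have h0 : PySem.List.pyGetD (x :: y :: t) 1 "" = y := by
        simpa using PySem.List.pyGetD_natCast (x :: y :: t) 1 ""
      have h1 : PySem.List.pyGetD (x :: y :: t) (1 - 1) "" = x := by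
        have : (1 : Int) - 1 = ((0 : Nat) : Int) := by norm_num
        rw [this, PySem.List.pyGetD_natCast]
        rfl
      have hshift : ∀ (e' : Int),
          (PySem.List.pyRange 2 ((x :: y :: t).length : Int) 1).foldl
            (fun e i =>
              if PySem.List.pyGetD (x :: y :: t) i "" ≠ PySem.List.pyGetD (x :: y :: t) (i - 1) "" then
                e + 2
              else e) e'
          = (PySem.List.pyRange 1 ((y :: t).length : Int) 1).foldl
            (fun e i =>
              if PySem.List.pyGetD (y :: t) i "" ≠ PySem.List.pyGetD (y :: t) (i - 1) "" then
                e + 2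
              else e) e' := by
        intro e'
        rw [PySem.List.pyRange_one, PySem.List.pyRange_one]
        have hlen : (((x :: y :: t).length : Int) - 2).toNat = (((y :: t).length : Int) - 1).toNat := by
          simp
          omega
        rw [hlen, List.foldl_map, List.foldl_map]
        apply PySem.List.foldl_congr_mem
        intro a b _
        have hb' : (b : Int) ≥ 0 := Int.natCast_nonneg b
        have e1 : (2 : Int) + (b : Int) = (((b + 2 : Nat)) : Int) := by omega
        have e2 : (2 : Int) + (b : Int) - 1 = (((b + 1 : Nat)) : Int) := by omega
        have e3 : (1 : Int) + (b : Int) = (((b + 1 : Nat)) : Int) := by omega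
        have e4 : (1 : Int) + (b : Int) - 1 = ((b : Nat) : Int) := by omega
        rw [e2, e4, e1, e3, PySem.List.pyGetD_natCast, PySem.List.pyGetD_natCast,
            PySem.List.pyGetD_natCast, PySem.List.pyGetD_natCast]
        simp
      have h2 : (1 : Int) + 1 = 2 := by norm_num
      rw [h2, hshift, h0, h1, ih]
      by_cases hxy : x = y
      · simp [chg, hxy]
      · simp [chg, hxy, Ne.symm hxy]
        ring

-- cnt splits additively at any interior point
theorem cnt_split (l : List String) :
    ∀ (n lo mid hi : Nat), mid - lo = n → lo < mid → mid < hi →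
    cnt l lo hi = cnt l lo mid + cnt l mid hi +
      (if l.getD mid "" ≠ l.getD (mid - 1) "" then (1 : Int) else 0) := by
  intro n
  induction n with
  | zero => intro lo mid hi h hm _; omega
  | succ k ih =>
      intro lo mid hi h hm hh
      rcases Nat.lt_or_ge (lo + 1) mid with hlt | hge
      · -- mid > lo + 1: unfold cnt at lo on both sides
        rw [cnt, if_neg (by omega)]
        rw [ih (lo + 1) mid hi (by omega) hlt hh]
        conv_rhs => rw [cnt, if_neg (by omega)]
        ring
      · -- mid = lo + 1
        have hmid : mid = lo + 1 := by omega
        subst hmid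
        rw [cnt, if_neg (by omega)]
        have hz : cnt l lo (lo + 1) = 0 := by rw [cnt]; simp
        rw [hz]
        have : lo + 1 - 1 = lo := by omega
        rw [this]
        ring

-- B's divide and conquer equals the linear count
theorem valtasok_eq_cnt (l : List String) :
    ∀ (n lo hi : Nat), hi - lo = n → valtasok l lo hi = cnt l lo hi := by
  intro n
  induction n using Nat.strong_induction_on with
  | _ n ih =>
      intro lo hi h
      rw [valtasok]
      by_cases hb : hi - lo ≤ 1
      · rw [if_pos hb, cnt, if_pos (by omega)]
      · rw [if_neg hb]
        have hm1 : lo < (lo + hi) / 2 := by omega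
        have hm2 : (lo + hi) / 2 < hi := by omega
        rw [ih ((lo + hi) / 2 - lo) (by omega) lo ((lo + hi) / 2) rfl,
            ih (hi - (lo + hi) / 2) (by omega) ((lo + hi) / 2) hi rfl,
            cnt_split l ((lo + hi) / 2 - lo) lo ((lo + hi) / 2) hi rfl hm1 hm2]

-- shifting the list by one shifts the counted range
theorem cnt_shift (x : String) (l : List String) :
    ∀ (n lo hi : Nat), hi - lo = n → cnt (x :: l) (lo + 1) (hi + 1) = cnt l lo hi := by
  intro n
  induction n using Nat.strong_induction_on with
  | _ n ih =>
      intro lo hi h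
      conv_lhs => rw [cnt]
      conv_rhs => rw [cnt]
      by_cases hb : hi ≤ lo + 1
      · rw [if_pos (by omega), if_pos hb]
      · rw [if_neg (by omega), if_neg hb]
        have hget : ∀ k : Nat, (x :: l).getD (k + 1) "" = l.getD k "" := by
          intro k; simp [List.getD]
        rw [show lo + 1 + 1 = (lo + 1) + 1 from rfl, hget (lo + 1), hget lo,
            ih (hi - (lo + 1)) (by omega) (lo + 1) hi rfl]

-- the linear count over the whole list is chg
theorem chg_eq_cnt (x : String) (xs : List String) :
    chg x xs = cnt (x :: xs) 0 (xs.length + 1) := by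
  induction xs generalizing x with
  | nil => rw [chg, cnt]; simp
  | cons y t ih =>
      conv_rhs => rw [cnt]
      rw [if_neg (by simp)]
      have h0 : (x :: y :: t).getD (0 + 1) "" = y := rfl
      have h1 : (x :: y :: t).getD 0 "" = x := rfl
      rw [h0, h1]
      have hs := cnt_shift x (y :: t) ((y :: t).length) 0 ((y :: t).length) rfl
      simp only [Nat.zero_add] at hs ⊢
      rw [hs, List.length_cons, ← ih y, chg]
      by_cases hxy : x = y
      · simp [hxy]
      · simp [hxy, Ne.symm hxy]

-- ===== VERDICT (by name: the statement is the Claim_ definition above) =====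
theorem energia_szamitas_spec : Claim_equal_energia_szamitas := by
  intro l _
  unfold Spec_energia_szamitas energia_szamitas energia_szamitas_alt
  cases l with
  | nil => simp
  | cons x xs =>
      simp only [if_neg (List.cons_ne_nil x xs)]
      rw [loopA_eq]
      rw [valtasok_eq_cnt (x :: xs) ((x :: xs).length - 0) 0 (x :: xs).length rfl]
      rw [show (x :: xs).length = xs.length + 1 from rfl, ← chg_eq_cnt x xs]
      ring
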